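-- pv_equiv track=rewrite | github.com/Jirehlov/SiglusSceneScriptUtility | src/siglus_ssu/tutorial.py | _is_immediate_selection_command
-- ===== SOURCE A (Python) =====
-- def _is_trace_command_base(ev, base_name: str) -> bool:
--     if not isinstance(ev, dict):
--         return False
--     base_name = str(base_name or "").casefold()
--     if not base_name:
--         return False
--     base = str(ev.get("_call_base_name") or "").casefold()
--     if base == base_name:
--         return True
--     name = str(ev.get("_call_name") or "").casefold()
--     return name == base_name or name.endswith("." + base_name)
--
-- def _is_immediate_selection_command(ev) -> bool:
--     if not isinstance(ev, dict):
--         return False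
--     return any(
--         _is_trace_command_base(ev, name)
--         for name in (
--             "sel",
--             "sel_cancel",
--             "selmsg",
--             "selmsg_cancel",
--             "selbtn",
--             "selbtn_cancel",
--         )
--     )
-- ===== SOURCE B (Python) =====
-- def _match(s: str) -> bool:
--     # Recognize the grammar  "sel" ("msg" | "btn")? ("_cancel")?  exactly:
--     # this accepts precisely the six selection-command names.
--     if not s.startswith("sel"):
--         return False
--     rest = s[3:]
--     if rest.endswith("_cancel"):
--         rest = rest[:-7]
--     return rest in ("", "msg", "btn")
--
--
-- def _is_immediate_selection_command(ev) -> bool: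
--     if not isinstance(ev, dict):
--         return False
--     base = str(ev.get("_call_base_name") or "").casefold()
--     name = str(ev.get("_call_name") or "").casefold()
--     _, dot, tail = name.rpartition(".")
--     return _match(base) or _match(name) or (bool(dot) and _match(tail))
-- ===== Notes on version B (the rewrite author's own statement) =====
-- stated objective: simpler
-- what changed: A enumerates six candidate names and tests each against the event's base/name with equality and endswith; B replaces the enumeration by a grammar recognizer _match that parses a string once as "sel"("msg"|"btn")?("_cancel")? (startswith, strip the optional _cancel suffix, check the middle), applied to base, name and the name's dotted tail extracted once via rpartition.
import Mathlib
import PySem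

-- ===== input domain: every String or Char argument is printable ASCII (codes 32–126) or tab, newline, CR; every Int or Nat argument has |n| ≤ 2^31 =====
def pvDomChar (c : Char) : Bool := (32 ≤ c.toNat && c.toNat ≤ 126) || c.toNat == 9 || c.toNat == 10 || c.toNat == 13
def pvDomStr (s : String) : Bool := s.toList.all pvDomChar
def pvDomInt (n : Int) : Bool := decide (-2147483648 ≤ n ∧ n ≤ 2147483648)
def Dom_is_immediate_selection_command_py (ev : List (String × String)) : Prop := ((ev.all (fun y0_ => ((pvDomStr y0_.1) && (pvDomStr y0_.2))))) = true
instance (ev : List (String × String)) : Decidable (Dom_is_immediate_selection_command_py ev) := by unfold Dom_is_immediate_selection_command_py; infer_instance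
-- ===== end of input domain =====

-- B drops A's six-candidate enumeration entirely: it recognizes the name grammar
-- "sel"("msg"|"btn")?("_cancel")? once per candidate string, extracting the name's
-- dotted suffix once via rpartition (objective: simpler).

-- ===== PORT A =====
-- helper: _is_trace_command_base(ev, base_name)
def is_trace_command_base (ev : List (String × String)) (base_name : String) : Bool :=
  -- isinstance(ev, dict) is always true under the type convention
  let bn := PySem.Str.lower base_name          -- str(base_name or "").casefold(); 'or ""' is identity on str
  if bn = "" then false
  else
    let base := PySem.Str.lower (((PySem.Dict.mk ev).get? "_call_base_name").getD "")
    if base = bn then true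
    else
      let name := PySem.Str.lower (((PySem.Dict.mk ev).get? "_call_name").getD "")
      (name = bn) || PySem.Str.endswith name ("." ++ bn)

def is_immediate_selection_command_py (ev : List (String × String)) : Bool :=
  -- any(_is_trace_command_base(ev, name) for name in (...))
  (["sel", "sel_cancel", "selmsg", "selmsg_cancel", "selbtn", "selbtn_cancel"]).any
    (fun n => is_trace_command_base ev n)

-- ===== PORT B =====
-- _match(s): recognize "sel"("msg"|"btn")?("_cancel")? — strings handled as char lists
def matchSel (s : List Char) : Bool :=
  if PySem.Chars.startswith s "sel".toList then
    let rest := s.drop 3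
    -- rest[:-7] = take (len-7); exact here since endswith guarantees length ≥ 7
    let rest := if PySem.Chars.endswith rest "_cancel".toList
                then rest.take (rest.length - 7) else rest
    rest = [] || rest = "msg".toList || rest = "btn".toList
  else false

def is_immediate_selection_command_py_alt (ev : List (String × String)) : Bool :=
  let base := PySem.Chars.lower (((PySem.Dict.mk ev).get? "_call_base_name").getD "").toList
  let name := PySem.Chars.lower (((PySem.Dict.mk ev).get? "_call_name").getD "").toList
  -- _, dot, tail = name.rpartition("."): split at the LAST '.', hand-ported via reverse;
  -- bool(dot) ↔ '.' occurs in name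
  let tail := (name.reverse.takeWhile (· ≠ '.')).reverse
  matchSel base || matchSel name || (name.contains '.' && matchSel tail)

-- ===== PRECONDITION & SPEC =====
def Spec_is_immediate_selection_command_py (ev : List (String × String)) (out : Bool) : Prop := out = is_immediate_selection_command_py_alt ev
instance (ev : List (String × String)) (out : Bool) : Decidable (Spec_is_immediate_selection_command_py ev out) := by unfold Spec_is_immediate_selection_command_py; infer_instance

-- ===== CLAIM (what is proved, stated in full; the proofs are below) =====
def Claim_equal_is_immediate_selection_command_py : Prop := ∀ (ev : List (String × String)), Dom_is_immediate_selection_command_py ev → Spec_is_immediate_selection_command_py ev (is_immediate_selection_command_py ev)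

-- ===== LEMMAS AND PROOFS =====

-- the grammar recognizer accepts exactly the six selection-command names
theorem matchSel_eq (cs : List Char) :
    matchSel cs = (decide (cs = "sel".toList) || decide (cs = "sel_cancel".toList) ||
      decide (cs = "selmsg".toList) || decide (cs = "selmsg_cancel".toList) ||
      decide (cs = "selbtn".toList) || decide (cs = "selbtn_cancel".toList)) := by
  apply Bool.eq_iff_iff.mpr
  simp only [Bool.or_eq_true, decide_eq_true_eq]
  constructor
  · intro h
    unfold matchSel at h
    by_cases hs : PySem.Chars.startswith cs "sel".toList = true
    · rcases (PySem.Chars.startswith_iff _ _).mp hs with ⟨t, ht⟩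
      subst ht
      have hdrop : ("sel".toList ++ t).drop 3 = t := by
        simpa using List.drop_left "sel".toList t
      rw [if_pos hs] at h
      simp only [hdrop] at h
      by_cases he : PySem.Chars.endswith t "_cancel".toList = true
      · rcases (PySem.Chars.endswith_iff _ _).mp he with ⟨p, hp⟩
        subst hp
        rw [if_pos he] at h
        have hlen : (p ++ "_cancel".toList).length - 7 = p.length := by
          simp [List.length_append]
        have htake : (p ++ "_cancel".toList).take p.length = p := List.take_left
        rw [hlen, htake] at h
        simp only [Bool.or_eq_true, decide_eq_true_eq] at h
        rcases h with (h | h) | h <;> subst h <;> simp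
      · rw [if_neg he] at h
        simp only [Bool.or_eq_true, decide_eq_true_eq] at h
        rcases h with (h | h) | h <;> subst h <;> simp
    · rw [if_neg hs] at h; exact absurd h (by simp)
  · rintro (((((h | h) | h) | h) | h) | h) <;> subst h <;> decide

-- takeWhile over a block that wholly satisfies p, followed by an element that fails it
theorem takeWhile_block {p : Char → Bool} (d : List Char) (y : Char) (rest : List Char)
    (hd : ∀ x ∈ d, p x = true) (hy : p y = false) :
    (d ++ y :: rest).takeWhile p = d := by
  induction d with
  | nil => simp [hy]
  | cons a t ih =>
      have ha := hd a (by simp)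
      simp only [List.cons_append, List.takeWhile_cons, ha, if_true]
      rw [ih (fun x hx => hd x (by simp [hx]))]

-- if '.' occurs in r, dropWhile (· ≠ '.') r starts with '.'
theorem dropWhile_dot (r : List Char) (h : '.' ∈ r) :
    ∃ rest, r.dropWhile (· ≠ '.') = '.' :: rest := by
  induction r with
  | nil => simp at h
  | cons a t ih =>
      by_cases ha : a = '.'
      · exact ⟨t, by simp [List.dropWhile, ha]⟩
      · have ht : '.' ∈ t := by
          rcases List.mem_cons.mp h with h1 | h1
          · exact absurd h1.symm ha
          · exact h1
        rcases ih ht with ⟨rest, hr⟩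
        refine ⟨rest, ?_⟩
        rw [List.dropWhile_cons, if_pos (by simp [ha]), hr]

-- for a dot-free candidate cs, name ends with '.'::cs iff '.' occurs in name and
-- the reversed takeWhile of the reversed name (= rpartition's tail) equals cs
theorem endswith_dot_iff (n cs : List Char) (h : '.' ∉ cs) :
    PySem.Chars.endswith n ('.' :: cs) = true ↔
      ('.' ∈ n ∧ (n.reverse.takeWhile (· ≠ '.')).reverse = cs) := by
  rw [PySem.Chars.endswith_iff]
  constructor
  · rintro ⟨pre, rfl⟩
    constructor
    · simp
    · have : (pre ++ '.' :: cs).reverse = cs.reverse ++ '.' :: pre.reverse := by simp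
      rw [this, takeWhile_block (p := (· ≠ '.')) cs.reverse '.' pre.reverse
            (fun x hx => by
              simp only [List.mem_reverse] at hx
              simp only [decide_eq_true_eq, ne_eq]
              exact fun hxeq => h (hxeq ▸ hx))
            (by simp)]
      simp
  · rintro ⟨hdot, htail⟩
    have hdotr : '.' ∈ n.reverse := by simp [hdot]
    rcases dropWhile_dot n.reverse hdotr with ⟨rest, hr⟩
    have hsplit : n.reverse = n.reverse.takeWhile (· ≠ '.') ++ '.' :: rest := by
      conv_lhs => rw [← List.takeWhile_append_dropWhile (p := (· ≠ '.')) (l := n.reverse)]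
      rw [hr]
    refine ⟨rest.reverse, ?_⟩
    have := congrArg List.reverse hsplit
    simp only [List.reverse_reverse] at this
    rw [this]
    simp only [ne_eq, decide_not] at htail
    simp [htail]

-- String equality unfolds to toList equality
theorem str_eq_iff (s t : String) : (s = t) ↔ s.toList = t.toList := String.ext_iff

-- ===== VERDICT (by name: the statement is the Claim_ definition above) =====
set_option maxHeartbeats 2000000 in
theorem is_immediate_selection_command_py_spec : Claim_equal_is_immediate_selection_command_py := by
  intro ev _
  unfold Spec_is_immediate_selection_command_py
  unfold is_immediate_selection_command_py is_immediate_selection_command_py_alt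
  unfold is_trace_command_base
  set b := (((PySem.Dict.mk ev).get? "_call_base_name").getD "") with hb
  set nm := (((PySem.Dict.mk ev).get? "_call_name").getD "") with hn
  simp only [List.any_cons, List.any_nil]
  rw [matchSel_eq, matchSel_eq, matchSel_eq]
  have hends : ∀ (c : String), '.' ∉ c.toList →
      PySem.Str.endswith (PySem.Str.lower nm) ("." ++ c) =
        ((PySem.Chars.lower nm.toList).contains '.' &&
          decide ((((PySem.Chars.lower nm.toList).reverse.takeWhile (· ≠ '.')).reverse) = c.toList)) := by
    intro c hc
    rw [PySem.Str.endswith_eq]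
    have h1 : ("." ++ c).toList = '.' :: c.toList := by
      rw [String.toList_append]; rfl
    rw [h1, PySem.Str.toList_lower]
    by_cases hcase : PySem.Chars.endswith (PySem.Chars.lower nm.toList) ('.' :: c.toList) = true
    · rcases (endswith_dot_iff _ _ hc).mp hcase with ⟨hd, ht⟩
      simp only [ne_eq, decide_not] at ht
      simp [hcase, List.contains_eq_mem, hd, ht]
    · have := (endswith_dot_iff (PySem.Chars.lower nm.toList) c.toList hc)
      simp only [Bool.not_eq_true] at hcase
      rw [hcase]
      by_cases hd : '.' ∈ PySem.Chars.lower nm.toList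
      · have ht : ¬ (((PySem.Chars.lower nm.toList).reverse.takeWhile (· ≠ '.')).reverse = c.toList) := by
          intro ht
          exact absurd (this.mpr ⟨hd, ht⟩) (by simp [hcase])
        simp only [ne_eq, decide_not] at ht
        simp [List.contains_eq_mem, hd, ht]
      · simp [List.contains_eq_mem, hd]
  simp only [show PySem.Str.lower "sel" = "sel" from by decide,
    show PySem.Str.lower "sel_cancel" = "sel_cancel" from by decide,
    show PySem.Str.lower "selmsg" = "selmsg" from by decide,
    show PySem.Str.lower "selmsg_cancel" = "selmsg_cancel" from by decide,
    show PySem.Str.lower "selbtn" = "selbtn" from by decide,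
    show PySem.Str.lower "selbtn_cancel" = "selbtn_cancel" from by decide]
  rw [hends "sel" (by decide), hends "sel_cancel" (by decide), hends "selmsg" (by decide),
      hends "selmsg_cancel" (by decide), hends "selbtn" (by decide), hends "selbtn_cancel" (by decide)]
  apply Bool.eq_iff_iff.mpr
  simp only [str_eq_iff, PySem.Str.toList_lower, ne_eq, decide_not,
    List.contains_eq_mem,
    Bool.or_eq_true, Bool.and_eq_true, decide_eq_true_eq]
  rw [if_neg (by decide : ¬("sel".toList = "".toList)),
      if_neg (by decide : ¬("sel_cancel".toList = "".toList)),
      if_neg (by decide : ¬("selmsg".toList = "".toList)),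
      if_neg (by decide : ¬("selmsg_cancel".toList = "".toList)),
      if_neg (by decide : ¬("selbtn".toList = "".toList)),
      if_neg (by decide : ¬("selbtn_cancel".toList = "".toList))]
  generalize PySem.Chars.lower b.toList = lb
  generalize PySem.Chars.lower nm.toList = ln
  generalize (List.takeWhile (fun x => !decide (x = '.')) ln.reverse).reverse = tl
  split_ifs <;> simp_all <;> tauto
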